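-- pv_equiv track=rewrite | github.com/jrpdrummer/aoc | Python/day_18/day_18.py | get_next_row
-- ===== SOURCE A (Python) =====
-- SAFE = '.'
--
-- TRAP = '^'
--
-- def get_next_row(row):
--     new_cell_list = []
--     num_cells = len(row)
--     last_index = num_cells - 1
--
--     for i in range(0, num_cells):
--         left = row[i-1] if i > 0 else SAFE
--         right = row[i+1] if i < last_index else SAFE
--
--         if left != right:
--             new_cell_list.append(TRAP)
--         else:
--             new_cell_list.append(SAFE)
--
--     return ''.join(new_cell_list)
-- ===== SOURCE B (Python) =====
-- SAFE = '.'
--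
-- TRAP = '^'
--
-- def get_next_row(row):
--     n = len(row)
--     p = int.from_bytes((SAFE + row + SAFE).encode(), 'big')
--     diff = (p ^ (p >> 16)) & ((1 << (8 * n)) - 1)
--     return ''.join(TRAP if b else SAFE for b in diff.to_bytes(n, 'big'))
-- ===== Notes on version B (the rewrite author's own statement) =====
-- stated objective: alternative
-- what changed: Instead of A's per-cell loop comparing left/right neighbours with boundary branches, B packs the SAFE-padded row into one big integer (one byte per character, big-endian), computes every cell simultaneously with a single wide XOR of that integer against its 16-bit right shift, masks to n bytes, and decodes nonzero bytes as traps.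
import Mathlib
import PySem

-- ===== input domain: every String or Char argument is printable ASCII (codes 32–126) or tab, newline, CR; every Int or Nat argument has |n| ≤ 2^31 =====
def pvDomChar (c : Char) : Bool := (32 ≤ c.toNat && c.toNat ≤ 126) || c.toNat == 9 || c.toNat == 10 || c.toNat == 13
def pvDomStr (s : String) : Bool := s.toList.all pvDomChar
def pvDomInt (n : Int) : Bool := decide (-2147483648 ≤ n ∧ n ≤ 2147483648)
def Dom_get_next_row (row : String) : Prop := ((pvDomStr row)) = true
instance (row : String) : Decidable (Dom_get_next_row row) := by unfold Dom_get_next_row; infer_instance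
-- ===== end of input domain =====

-- B packs the SAFE-padded row into one big integer (one byte per char, big-endian), computes every
-- cell at once as a single XOR of that integer with its 16-bit right shift, and decodes the nonzero
-- bytes — a whole-row bitwise algorithm instead of A's per-cell neighbour-comparison loop.

-- ===== PORT A =====
def get_next_row (row : String) : String :=
  let cs := row.toList
  let num_cells : Int := cs.length
  let last_index : Int := num_cells - 1
  let new_cell_list := (PySem.List.pyRange 0 num_cells 1).foldl (fun acc i =>
    let left := if i > 0 then PySem.List.pyGetD cs (i - 1) '.' else '.'
    let right := if i < last_index then PySem.List.pyGetD cs (i + 1) '.' else '.'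
    if left != right then acc ++ ['^'] else acc ++ ['.']) []
  String.ofList new_cell_list

-- ===== PORT B =====
-- int.from_bytes(·,'big') is ported as the big-endian fold over the byte codes, and
-- diff.to_bytes(n,'big') as the map extracting byte n-1-i (exact: the mask keeps diff < 256^n).
def get_next_row_alt (row : String) : String :=
  let cs := row.toList
  let n := cs.length
  let p := (('.' :: cs ++ ['.']).map Char.toNat).foldl (fun p a => p * 256 + a) 0
  let diff := (p ^^^ (p >>> 16)) % 2 ^ (8 * n)
  String.ofList ((List.range n).map (fun i =>
    if (diff / 256 ^ (n - 1 - i)) % 256 ≠ 0 then '^' else '.'))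

-- ===== PRECONDITION & SPEC =====
def Spec_get_next_row (row : String) (out : String) : Prop := out = get_next_row_alt row
instance (row : String) (out : String) : Decidable (Spec_get_next_row row out) := by unfold Spec_get_next_row; infer_instance

-- ===== CLAIM (what is proved, stated in full; the proofs are below) =====
def Claim_equal_get_next_row : Prop := ∀ (row : String), Dom_get_next_row row → Spec_get_next_row row (get_next_row row)

-- ===== LEMMAS AND PROOFS =====

-- the per-cell value A's loop appends at index i
def cellA (cs : List Char) (i : Int) : Char :=
  if (if i > 0 then PySem.List.pyGetD cs (i - 1) '.' else '.')
      != (if i < (cs.length : Int) - 1 then PySem.List.pyGetD cs (i + 1) '.' else '.')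
  then '^' else '.'

-- A's "left" neighbour at index k is the padded row's entry at k
theorem padL (cs : List Char) (k : Nat) (hk : k < cs.length) :
    ('.' :: cs ++ ['.'])[k]? = some (if (k:Int) > 0 then PySem.List.pyGetD cs ((k:Int) - 1) '.' else '.') := by
  cases k with
  | zero => simp
  | succ j =>
    have hj : j < cs.length := by omega
    have hc : ((j+1 : Nat) : Int) - 1 = (j : Int) := by push_cast; omega
    simp only [List.cons_append, List.getElem?_cons_succ, hc]
    rw [List.getElem?_append_left hj, List.getElem?_eq_getElem hj]
    simp [List.getD_eq_getElem?_getD, List.getElem?_eq_getElem hj]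

-- A's "right" neighbour at index k is the padded row's entry at k+2
theorem padR (cs : List Char) (k : Nat) (hk : k < cs.length) :
    ('.' :: cs ++ ['.'])[k+2]? = some (if (k:Int) < (cs.length : Int) - 1 then PySem.List.pyGetD cs ((k:Int) + 1) '.' else '.') := by
  rw [show k + 2 = (k+1)+1 from by omega]
  simp only [List.cons_append, List.getElem?_cons_succ]
  by_cases hl : k + 1 < cs.length
  · rw [List.getElem?_append_left hl, List.getElem?_eq_getElem hl]
    have hi : ((k:Int)) < (cs.length : Int) - 1 := by omega
    rw [if_pos hi, show ((k:Int)) + 1 = ((k+1 : Nat) : Int) from by push_cast; ring,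
      PySem.List.pyGetD_natCast, List.getD_eq_getElem?_getD, List.getElem?_eq_getElem hl]
    simp
  · have hke : k + 1 = cs.length := by omega
    rw [List.getElem?_append_right (by omega)]
    have hi : ¬ ((k:Int)) < (cs.length : Int) - 1 := by omega
    simp [hi, hke]

-- base-256 value of a digit list (the meaning of B's packing fold)
def val256 (l : List Nat) : Nat := l.foldl (fun p a => p * 256 + a) 0

theorem val256_shift (l : List Nat) (s : Nat) :
    l.foldl (fun p a => p * 256 + a) s = s * 256 ^ l.length + val256 l := by
  induction l generalizing s with
  | nil => simp [val256]
  | cons b t ih =>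
    simp only [List.foldl_cons, List.length_cons]
    rw [ih (s * 256 + b)]
    have h2 : val256 (b :: t) = (0 * 256 + b) * 256 ^ t.length + val256 t := ih (0 * 256 + b)
    rw [h2]
    ring

theorem val256_cons (a : Nat) (l : List Nat) :
    val256 (a :: l) = a * 256 ^ l.length + val256 l := by
  show l.foldl (fun p a => p * 256 + a) (0 * 256 + a) = _
  rw [val256_shift]; ring_nf

theorem val256_append (l₁ l₂ : List Nat) :
    val256 (l₁ ++ l₂) = val256 l₁ * 256 ^ l₂.length + val256 l₂ := by
  show (l₁ ++ l₂).foldl (fun p a => p * 256 + a) 0 = _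
  rw [List.foldl_append, val256_shift]
  rfl

theorem val256_lt (l : List Nat) (h : ∀ a ∈ l, a < 256) : val256 l < 256 ^ l.length := by
  induction l with
  | nil => simp [val256]
  | cons a t ih =>
    rw [val256_cons]
    have ha : a < 256 := h a (by simp)
    have ht : val256 t < 256 ^ t.length := ih (fun b hb => h b (by simp [hb]))
    calc a * 256 ^ t.length + val256 t < a * 256 ^ t.length + 256 ^ t.length := by omega
      _ = (a + 1) * 256 ^ t.length := by ring
      _ ≤ 256 * 256 ^ t.length := Nat.mul_le_mul_right _ (by omega)
      _ = 256 ^ (a :: t).length := by rw [List.length_cons, pow_succ]; ring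

-- byte k (from the least significant end) of a packed digit list is digit length-1-k
theorem val256_byte (l : List Nat) (h : ∀ a ∈ l, a < 256) (k : Nat) (hk : k < l.length) :
    val256 l / 256 ^ k % 256 = l.getD (l.length - 1 - k) 0 := by
  set j := l.length - 1 - k with hj
  have hjl : j < l.length := by omega
  have hsplit : l = l.take j ++ l.drop j := (List.take_append_drop j l).symm
  have hdrop : l.drop j = l[j] :: l.drop (j+1) := List.drop_eq_getElem_cons hjl
  have hlen : (l.drop (j+1)).length = k := by
    rw [List.length_drop]; omega
  have hr : val256 (l.drop (j+1)) < 256 ^ k := by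
    rw [← hlen]
    exact val256_lt _ (fun a ha => h a (List.mem_of_mem_drop ha))
  have hB : l[j] < 256 := h _ (List.getElem_mem hjl)
  have hval : val256 l = (val256 (l.take j) * 256 + l[j]) * 256 ^ k + val256 (l.drop (j+1)) := by
    conv_lhs => rw [hsplit]
    rw [val256_append, hdrop, val256_cons, hlen]
    simp only [List.length_cons, hlen, pow_succ]
    ring
  rw [hval]
  rw [add_comm, Nat.add_mul_div_right _ _ (Nat.pow_pos (by norm_num)),
    Nat.div_eq_of_lt hr, Nat.zero_add, List.getD_eq_getElem l 0 hjl]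
  omega

-- the mask keeps the low n bytes unchanged
theorem byte_mask (x n k : Nat) (hk : k < n) :
    x % 2 ^ (8 * n) / 256 ^ k % 256 = x / 256 ^ k % 256 := by
  rw [show (256:ℕ) ^ k = 2 ^ (8 * k) from by rw [show (256:ℕ) = 2 ^ 8 from by norm_num, ← pow_mul],
    show (256:ℕ) = 2 ^ 8 from by norm_num, ← Nat.shiftRight_eq_div_pow, ← Nat.shiftRight_eq_div_pow]
  apply Nat.eq_of_testBit_eq
  intro i
  simp only [Nat.testBit_mod_two_pow, Nat.testBit_shiftRight]
  by_cases hi : i < 8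
  · have h8 : 8 * k + i < 8 * n := by omega
    simp [hi, h8]
  · simp [hi]

-- a byte of an XOR is the XOR of the bytes
theorem byte_xor (a b k : Nat) :
    (a ^^^ b) / 256 ^ k % 256 = (a / 256 ^ k % 256) ^^^ (b / 256 ^ k % 256) := by
  rw [show (256:ℕ) ^ k = 2 ^ (8 * k) from by rw [show (256:ℕ) = 2 ^ 8 from by norm_num, ← pow_mul],
    show (256:ℕ) = 2 ^ 8 from by norm_num, ← Nat.shiftRight_eq_div_pow, ← Nat.shiftRight_eq_div_pow,
    ← Nat.shiftRight_eq_div_pow]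
  apply Nat.eq_of_testBit_eq
  intro i
  simp only [Nat.testBit_mod_two_pow, Nat.testBit_shiftRight, Nat.testBit_xor]
  by_cases hi : i < 8
  · simp [hi]
  · simp [hi]

-- a byte of the 16-bit shift is a byte two places up
theorem byte_shift16 (p k : Nat) :
    (p >>> 16) / 256 ^ k % 256 = p / 256 ^ (k + 2) % 256 := by
  have h : (2:ℕ) ^ 16 * 256 ^ k = 256 ^ (k + 2) := by
    rw [pow_add]
    norm_num [Nat.mul_comm]
  rw [Nat.shiftRight_eq_div_pow, Nat.div_div_eq_div_mul, h]

theorem char_toNat_inj (a b : Char) (h : a.toNat = b.toNat) : a = b := by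
  have := congrArg Char.ofNat h
  rwa [Char.ofNat_toNat, Char.ofNat_toNat] at this

-- domain: every character of the row has a one-byte code
theorem dom_codes_lt (row : String) (hd : Dom_get_next_row row) :
    ∀ c ∈ row.toList, c.toNat < 256 := by
  intro c hc
  have := List.all_eq_true.1 hd c hc
  simp only [pvDomChar, Bool.or_eq_true, Bool.and_eq_true, decide_eq_true_eq, beq_iff_eq] at this
  omega

-- the central fact: A's loop output list equals B's decoded byte list
theorem key (cs : List Char) (h256 : ∀ c ∈ cs, c.toNat < 256) :
    (PySem.List.pyRange 0 (cs.length : Int) 1).foldl (fun acc i =>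
      let left := if i > 0 then PySem.List.pyGetD cs (i - 1) '.' else '.'
      let right := if i < (cs.length : Int) - 1 then PySem.List.pyGetD cs (i + 1) '.' else '.'
      if left != right then acc ++ ['^'] else acc ++ ['.']) []
    = (List.range cs.length).map (fun i =>
        if ((((('.' :: cs ++ ['.']).map Char.toNat).foldl (fun p a => p * 256 + a) 0
              ^^^ ((('.' :: cs ++ ['.']).map Char.toNat).foldl (fun p a => p * 256 + a) 0 >>> 16))
              % 2 ^ (8 * cs.length)) / 256 ^ (cs.length - 1 - i)) % 256 ≠ 0 then '^' else '.') := by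
  have hb : (fun (acc : List Char) (i : Int) =>
      let left := if i > 0 then PySem.List.pyGetD cs (i - 1) '.' else '.'
      let right := if i < (cs.length : Int) - 1 then PySem.List.pyGetD cs (i + 1) '.' else '.'
      if left != right then acc ++ ['^'] else acc ++ ['.'])
      = fun acc i => acc ++ [cellA cs i] := by
    funext acc i
    simp only [cellA]
    split_ifs <;> rfl
  rw [hb, PySem.List.foldl_append_singleton_eq_map, List.nil_append, PySem.List.pyRange_one]
  set n := cs.length with hn
  set padded := '.' :: cs ++ ['.'] with hpad
  set pc := padded.map Char.toNat with hpc
  have hpclen : pc.length = n + 2 := by simp [hpc, hpad, hn]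
  have hpc256 : ∀ a ∈ pc, a < 256 := by
    intro a ha
    rcases List.mem_map.1 ha with ⟨c, hc, rfl⟩
    rcases List.mem_cons.1 hc with rfl | hc'
    · decide
    · rcases List.mem_append.1 hc' with hc'' | hc''
      · exact h256 c hc''
      · rcases List.mem_singleton.1 hc''
        decide
  have hp : pc.foldl (fun p a => p * 256 + a) 0 = val256 pc := rfl
  apply List.ext_getElem
  · simp
  · intro i h1 h2
    have hi : i < n := by simpa using h2
    simp only [List.getElem_map, List.getElem_range]
    -- the byte index this cell reads
    have hkn : n - 1 - i < n := by omega
    rw [hp, byte_mask _ _ _ hkn, byte_xor,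
      val256_byte pc hpc256 (n - 1 - i) (by omega),
      byte_shift16, val256_byte pc hpc256 (n - 1 - i + 2) (by omega), hpclen]
    have e1 : n + 2 - 1 - (n - 1 - i) = i + 2 := by omega
    have e2 : n + 2 - 1 - (n - 1 - i + 2) = i := by omega
    rw [e1, e2]
    -- identify the two getD's with the padded characters
    have hiL : i < padded.length := by simp [hpad]; omega
    have hiR : i + 2 < padded.length := by simp [hpad]; omega
    have hgL : pc.getD i 0 = (padded[i]'hiL).toNat := by
      rw [hpc, List.getD_eq_getElem _ 0 (by simp [hpad]; omega), List.getElem_map]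
    have hgR : pc.getD (i + 2) 0 = (padded[i+2]'hiR).toNat := by
      rw [hpc, List.getD_eq_getElem _ 0 (by simp [hpad]; omega), List.getElem_map]
    have hL : padded[i]'hiL
        = (if (i:Int) > 0 then PySem.List.pyGetD cs ((i:Int) - 1) '.' else '.') :=
      Option.some.inj ((List.getElem?_eq_getElem hiL).symm.trans (padL cs i hi))
    have hR : padded[i+2]'hiR
        = (if (i:Int) < (n : Int) - 1 then PySem.List.pyGetD cs ((i:Int) + 1) '.' else '.') :=
      Option.some.inj ((List.getElem?_eq_getElem hiR).symm.trans (padR cs i hi))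
    rw [hgL, hgR]
    simp only [cellA, zero_add, ← hn, ← hL, ← hR]
    by_cases heq : padded[i]'hiL = padded[i+2]'hiR
    · simp [heq]
    · have hne : (padded[i+2]'hiR).toNat ^^^ (padded[i]'hiL).toNat ≠ 0 := by
        intro h0
        exact heq (char_toNat_inj _ _ (Nat.xor_eq_zero_iff.1 h0).symm)
      simp [hne, bne_iff_ne, Ne, fun h => heq h]

-- ===== VERDICT (by name: the statement is the Claim_ definition above) =====
theorem get_next_row_spec : Claim_equal_get_next_row := by
  intro row hd
  exact congrArg String.ofList (key row.toList (dom_codes_lt row hd))
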